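-- pv_equiv track=rewrite | github.com/TrueJacobG/python | CP/codewars/22.py | solution
-- ===== SOURCE A (Python) =====
-- def solution(string, markers):
--     lines = string.split("\n")
--     for number, line in enumerate(lines):
--         for m in markers:
--             i = line.find(m)
--             if i != -1:
--                 line = line[:i]
--         lines[number] = line.rstrip(" ")
--     return "\n".join(lines)
-- ===== SOURCE B (Python) =====
-- def solution(string, markers):
--     return _join(string.split("\n"), markers)
--
--
-- def _join(lines, markers):
--     # divide and conquer over the lines: emit each half, glue with one "\n"
--     n = len(lines)
--     if n == 0:
--         return ""
--     if n == 1: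
--         return _clip(lines[0], markers).rstrip(" ")
--     mid = n // 2
--     return _join(lines[:mid], markers) + "\n" + _join(lines[mid:], markers)
--
--
-- def _clip(line, ms):
--     # divide and conquer over the markers: clip by the first half, then by the second
--     n = len(ms)
--     if n == 0:
--         return line
--     if n == 1:
--         i = line.find(ms[0])
--         return line if i == -1 else line[:i]
--     mid = n // 2
--     return _clip(_clip(line, ms[:mid]), ms[mid:])
-- ===== Notes on version B (the rewrite author's own statement) =====
-- stated objective: alternative
-- what changed: A runs imperative loops: enumerate over the split lines with index assignment back into the list, an inner for-loop over markers mutating the line, and a final join; B is a mutation-free divide and conquer: the line list is halved recursively and the two emitted halves glued with one newline, and the marker list is halved recursively, clipping by the first half then the second; no enumerate, no index assignment, no join.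
import Mathlib
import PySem

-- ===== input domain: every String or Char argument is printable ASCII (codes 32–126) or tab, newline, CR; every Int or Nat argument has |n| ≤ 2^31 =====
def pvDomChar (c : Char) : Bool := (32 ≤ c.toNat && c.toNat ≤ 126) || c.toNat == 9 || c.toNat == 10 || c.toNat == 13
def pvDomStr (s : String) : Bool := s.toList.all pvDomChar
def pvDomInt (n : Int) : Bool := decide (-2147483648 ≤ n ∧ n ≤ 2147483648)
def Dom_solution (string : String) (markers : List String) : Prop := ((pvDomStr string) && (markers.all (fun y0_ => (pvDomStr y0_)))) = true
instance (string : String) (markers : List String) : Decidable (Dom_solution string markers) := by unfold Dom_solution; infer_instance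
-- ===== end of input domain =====

-- B replaces A's imperative loops (enumerate + index assignment + join, inner
-- for-loop mutating the line) by a mutation-free divide and conquer over both
-- the line list and the marker list; objective: alternative, same asymptotic cost.

-- ===== PORT A =====
-- hand port of line.rstrip(" ") — exact: drops trailing ' ' (U+0020) only
def pvRstripSp (l : List Char) : List Char :=
  (l.reverse.dropWhile (fun ch => ch == ' ')).reverse

def solution (string : String) (markers : List String) : String :=
  let lines := (PySem.Str.split? string "\n").getD []  -- "\n" ≠ "" so split? is some
  -- enumerate with index assignment lines[number] = …; each step reads the not-yet-modified entry
  let lines := (PySem.List.enumerate lines).foldl (fun ls nl =>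
      let line := markers.foldl (fun line m =>
          let i := PySem.Str.find line m
          if i ≠ -1 then PySem.Str.slice line none (some i) else line) nl.2
      PySem.List.pySetD ls nl.1 (String.ofList (pvRstripSp line.toList))) lines
  PySem.Str.join "\n" lines

-- ===== PORT B =====
-- _clip: divide and conquer over the markers (n == 1 clips at the first occurrence).
-- The Nat argument is fuel (length of the marker list) making the halving recursion
-- structural; it never alters the computed value.
def pvClipF : Nat → List Char → List String → List Char
  | _, line, [] => line
  | _, line, [m] =>
      let i := PySem.Chars.find line m.toList
      if i == -1 then line else PySem.List.slice line none (some i)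
  | 0, line, _ => line
  | fuel + 1, line, m1 :: m2 :: rest =>
      let ms := m1 :: m2 :: rest
      let mid := ms.length / 2
      pvClipF fuel (pvClipF fuel line (ms.take mid)) (ms.drop mid)

def pvClip (line : List Char) (ms : List String) : List Char :=
  pvClipF ms.length line ms

-- _join: divide and conquer over the lines, gluing the halves with one "\n"
-- (same fuel device, fuel = number of lines)
def pvJoinF : Nat → List (List Char) → List String → List Char
  | _, [], _ => []
  | _, [l], markers => pvRstripSp (pvClip l markers)
  | 0, _, _ => []
  | fuel + 1, l1 :: l2 :: rest, markers =>
      let lines := l1 :: l2 :: rest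
      let mid := lines.length / 2
      pvJoinF fuel (lines.take mid) markers ++ '\n' :: pvJoinF fuel (lines.drop mid) markers

def pvJoin (lines : List (List Char)) (markers : List String) : List Char :=
  pvJoinF lines.length lines markers

def solution_alt (string : String) (markers : List String) : String :=
  String.ofList (pvJoin (((PySem.Str.split? string "\n").getD []).map String.toList) markers)

-- ===== PRECONDITION & SPEC =====
def Spec_solution (string : String) (markers : List String) (out : String) : Prop := out = solution_alt string markers
instance (string : String) (markers : List String) (out : String) : Decidable (Spec_solution string markers out) := by unfold Spec_solution; infer_instance

-- ===== CLAIM =====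
def Claim_equal_solution : Prop := ∀ (string : String) (markers : List String), Dom_solution string markers → Spec_solution string markers (solution string markers)

-- ===== LEMMAS AND PROOFS =====

-- the one-marker clipping step, on char lists
def pvStep (l : List Char) (m : String) : List Char :=
  let i := PySem.Chars.find l m.toList
  if i == -1 then l else PySem.List.slice l none (some i)

-- B's divide-and-conquer over the markers is the sequential left fold
lemma clipF_foldl : ∀ (n : Nat) (line : List Char) (ms : List String), ms.length ≤ n →
    pvClipF n line ms = ms.foldl pvStep line := by
  intro n
  induction n with
  | zero =>
    intro line ms h
    cases ms with
    | nil => simp [pvClipF]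
    | cons m rest => simp at h
  | succ n ih =>
    intro line ms h
    match ms with
    | [] => simp [pvClipF]
    | [m] => simp [pvClipF, pvStep]
    | m1 :: m2 :: rest =>
      simp only [pvClipF]
      have h1 : (List.take ((m1 :: m2 :: rest).length / 2) (m1 :: m2 :: rest)).length ≤ n := by
        simp only [List.length_take, List.length_cons] at *; omega
      have h2 : (List.drop ((m1 :: m2 :: rest).length / 2) (m1 :: m2 :: rest)).length ≤ n := by
        simp only [List.length_drop, List.length_cons] at *; omega
      rw [ih _ _ h2, ih _ _ h1, ← List.foldl_append, List.take_append_drop]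

lemma clip_foldl : ∀ (line : List Char) (ms : List String),
    pvClip line ms = ms.foldl pvStep line := by
  intro line ms
  exact clipF_foldl ms.length line ms (le_refl _)

-- A's per-line marker fold (on Strings) computes the char-level fold
lemma foldA_chars : ∀ (ms : List String) (line : String),
    (ms.foldl (fun line m =>
        let i := PySem.Str.find line m
        if i ≠ -1 then PySem.Str.slice line none (some i) else line) line).toList
      = ms.foldl pvStep line.toList := by
  intro ms
  induction ms with
  | nil => intro line; simp
  | cons m rest ih =>
    intro line
    rw [List.foldl_cons, List.foldl_cons, ih]
    congr 1
    simp only [pvStep, PySem.Str.find_eq]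
    by_cases hneg : PySem.Chars.find line.toList m.toList = -1
    · rw [if_neg (by simp [hneg]), if_pos (by simp [hneg])]
    · rw [if_pos (by simp [hneg]), if_neg (by simp [hneg])]
      simp

-- "\n".join splits across a concatenation of two nonempty halves
lemma join_append (sep : List Char) : ∀ (xs ys : List (List Char)), xs ≠ [] → ys ≠ [] →
    PySem.Chars.join sep (xs ++ ys)
      = PySem.Chars.join sep xs ++ sep ++ PySem.Chars.join sep ys := by
  intro xs
  induction xs with
  | nil => intro ys h _; exact absurd rfl h
  | cons x xs ih =>
    intro ys _ hy
    cases xs with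
    | nil =>
      cases ys with
      | nil => exact absurd rfl hy
      | cons y ys' =>
        simp only [List.cons_append, List.nil_append]
        rw [PySem.Chars.join_cons_cons, PySem.Chars.join_singleton]
    | cons x2 xs2 =>
      have h1 : (x :: x2 :: xs2) ++ ys = x :: ((x2 :: xs2) ++ ys) := by simp
      have h2 : (x2 :: xs2) ++ ys = x2 :: (xs2 ++ ys) := by simp
      rw [h1, h2, PySem.Chars.join_cons_cons, ← h2,
        ih ys (by simp) hy, PySem.Chars.join_cons_cons]
      simp [List.append_assoc]

-- B's divide-and-conquer over the lines is "\n".join of the per-line results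
lemma joinF_join : ∀ (n : Nat) (lines : List (List Char)) (markers : List String), lines.length ≤ n →
    PySem.Chars.join ['\n'] (lines.map (fun l => pvRstripSp (pvClip l markers)))
      = pvJoinF n lines markers := by
  intro n
  induction n with
  | zero =>
    intro lines markers h
    cases lines with
    | nil => simp [pvJoinF, PySem.Chars.join_nil]
    | cons l rest => simp at h
  | succ n ih =>
    intro lines markers h
    match lines with
    | [] => simp [pvJoinF, PySem.Chars.join_nil]
    | [l] => simp [pvJoinF, PySem.Chars.join_singleton]
    | l1 :: l2 :: rest =>
      simp only [pvJoinF]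
      have h1 : (List.take ((l1 :: l2 :: rest).length / 2) (l1 :: l2 :: rest)).length ≤ n := by
        simp only [List.length_take, List.length_cons] at *; omega
      have h2 : (List.drop ((l1 :: l2 :: rest).length / 2) (l1 :: l2 :: rest)).length ≤ n := by
        simp only [List.length_drop, List.length_cons] at *; omega
      calc PySem.Chars.join ['\n'] ((l1 :: l2 :: rest).map (fun l => pvRstripSp (pvClip l markers)))
          = PySem.Chars.join ['\n']
              (((l1 :: l2 :: rest).take ((l1 :: l2 :: rest).length / 2)).map (fun l => pvRstripSp (pvClip l markers))
                ++ (((l1 :: l2 :: rest).drop ((l1 :: l2 :: rest).length / 2)).map (fun l => pvRstripSp (pvClip l markers)))) := by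
            rw [← List.map_append, List.take_append_drop]
        _ = _ := by
            rw [join_append _ _ _ (by simp) (by simp; omega),
              ih _ markers h1, ih _ markers h2]
            simp [List.append_assoc]

lemma join_pvJoin : ∀ (lines : List (List Char)) (markers : List String),
    PySem.Chars.join ['\n'] (lines.map (fun l => pvRstripSp (pvClip l markers)))
      = pvJoin lines markers := by
  intro lines markers
  exact joinF_join lines.length lines markers (le_refl _)

-- A's enumerate-and-assign loop over the lines is a map
lemma enum_fold (f : String → String) : ∀ (suf pre : List String),
    (PySem.List.enumerate suf (pre.length : Int)).foldl
        (fun ls nl => PySem.List.pySetD ls nl.1 (f nl.2)) (pre ++ suf)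
      = pre ++ suf.map f := by
  intro suf
  induction suf with
  | nil => intro pre; simp [PySem.List.enumerate]
  | cons x xs ih =>
    intro pre
    have henum : PySem.List.enumerate (x :: xs) (pre.length : Int)
        = ((pre.length : Int), x) :: PySem.List.enumerate xs ((pre.length : Int) + 1) := by
      simp [PySem.List.enumerate]
    rw [henum, List.foldl_cons]
    have hset : PySem.List.pySetD (pre ++ x :: xs) (pre.length : Int) (f x)
        = (pre ++ [f x]) ++ xs := by
      simp [pysem]
    rw [hset]
    have hlen : ((pre.length : Int) + 1) = (((pre ++ [f x]).length : Nat) : Int) := by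
      simp
    rw [hlen, ih (pre ++ [f x])]
    simp

-- ===== VERDICT =====
theorem solution_spec : Claim_equal_solution := by
  intro string markers _
  show solution string markers = solution_alt string markers
  apply String.toList_inj.mp
  simp only [solution, solution_alt]
  have h := enum_fold (fun line => String.ofList (pvRstripSp ((markers.foldl (fun line m =>
      let i := PySem.Str.find line m
      if i ≠ -1 then PySem.Str.slice line none (some i) else line) line)).toList))
    ((PySem.Str.split? string "\n").getD []) []
  simp only [List.length_nil, Nat.cast_zero, List.nil_append] at h
  rw [h]
  have hmap : ∀ s : String,
      String.ofList (pvRstripSp ((markers.foldl (fun line m =>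
        let i := PySem.Str.find line m
        if i ≠ -1 then PySem.Str.slice line none (some i) else line) s)).toList)
      = String.ofList (pvRstripSp (pvClip s.toList markers)) := by
    intro s; rw [foldA_chars, ← clip_foldl]
  rw [List.map_congr_left (fun s _ => hmap s)]
  rw [PySem.Str.toList_join]
  have hmap2 : List.map String.toList
      (List.map (fun s => String.ofList (pvRstripSp (pvClip s.toList markers)))
        ((PySem.Str.split? string "\n").getD []))
      = (((PySem.Str.split? string "\n").getD []).map String.toList).map
          (fun l => pvRstripSp (pvClip l markers)) := by
    simp [List.map_map, Function.comp]
  have hsep : ("\n" : String).toList = ['\n'] := rfl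
  rw [hmap2, hsep, join_pvJoin]
  simp
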